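-- pv_equiv track=rewrite | github.com/takitaki7474/m2-research-prototype | prototype/get_dataset.py | get_specific_label_dataset
-- ===== SOURCE A (Python) =====
-- def get_one_label_data(class_label, dataset):
--     new_data = []
--     for data in dataset:
--         label = data[1]
--         if label == class_label:
--             new_data.append(data)
--     return new_data
--
-- def get_one_label_dataset(class_label, train_dataset, test_dataset):
--     train = get_one_label_data(class_label, train_dataset)
--     test = get_one_label_data(class_label, test_dataset)
--     return train, test
--
-- def get_specific_label_dataset(class_label_list, train_dataset, test_dataset):
--     new_train = []
--     new_test = []
--     for label in class_label_list:
--         train, test = get_one_label_dataset(label, train_dataset, test_dataset)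
--         new_train += train
--         new_test += test
--     return new_train, new_test
-- ===== SOURCE B (Python) =====
-- def get_specific_label_dataset(class_label_list, train_dataset, test_dataset):
--     def group(dataset):
--         buckets = {}
--         for item in dataset:
--             buckets.setdefault(item[1], []).append(item)
--         return buckets
--     train_by_label = group(train_dataset)
--     test_by_label = group(test_dataset)
--     new_train = [x for label in class_label_list for x in train_by_label.get(label, [])]
--     new_test = [x for label in class_label_list for x in test_by_label.get(label, [])]
--     return new_train, new_test
-- ===== Notes on version B (the rewrite author's own statement) =====
-- stated objective: faster
-- what changed: B builds one dict bucketing items by label per dataset in a single pass, then concatenates the buckets in label-list order, instead of rescanning both full datasets for every label.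
import Mathlib
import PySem

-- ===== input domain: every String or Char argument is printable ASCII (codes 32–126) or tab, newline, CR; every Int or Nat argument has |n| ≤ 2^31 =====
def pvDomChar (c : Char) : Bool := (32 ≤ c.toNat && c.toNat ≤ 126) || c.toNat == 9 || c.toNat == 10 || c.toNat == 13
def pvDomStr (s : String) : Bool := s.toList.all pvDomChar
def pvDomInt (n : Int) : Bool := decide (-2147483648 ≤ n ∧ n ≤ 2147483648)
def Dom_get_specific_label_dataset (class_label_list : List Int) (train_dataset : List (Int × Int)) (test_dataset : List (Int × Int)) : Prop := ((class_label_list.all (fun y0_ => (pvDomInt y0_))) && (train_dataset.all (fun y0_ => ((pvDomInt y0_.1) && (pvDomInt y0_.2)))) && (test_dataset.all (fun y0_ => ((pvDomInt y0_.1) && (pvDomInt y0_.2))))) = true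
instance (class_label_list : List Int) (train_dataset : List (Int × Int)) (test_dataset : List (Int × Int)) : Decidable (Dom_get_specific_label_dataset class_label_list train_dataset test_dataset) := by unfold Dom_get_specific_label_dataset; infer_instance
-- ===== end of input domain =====

-- B replaces A's per-label rescans of both datasets with one bucketing pass per dataset
-- (dict from label to its items) and concatenates buckets in label-list order: objective = faster.

-- ===== PORT A =====
def get_one_label_data (class_label : Int) (dataset : List (Int × Int)) : List (Int × Int) :=
  dataset.foldl (fun new_data data => if data.2 == class_label then new_data ++ [data] else new_data) []

def get_one_label_dataset (class_label : Int) (train_dataset : List (Int × Int)) (test_dataset : List (Int × Int)) : (List (Int × Int)) × (List (Int × Int)) :=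
  (get_one_label_data class_label train_dataset, get_one_label_data class_label test_dataset)

def get_specific_label_dataset (class_label_list : List Int) (train_dataset : List (Int × Int)) (test_dataset : List (Int × Int)) : (List (Int × Int)) × (List (Int × Int)) :=
  class_label_list.foldl
    (fun acc label =>
      let tt := get_one_label_dataset label train_dataset test_dataset
      (acc.1 ++ tt.1, acc.2 ++ tt.2))
    ([], [])

-- ===== PORT B =====
-- buckets.setdefault(item[1], []).append(item)  ==  modify item.2 [] (· ++ [item])
def pvGroupByLabel (dataset : List (Int × Int)) : PySem.Dict Int (List (Int × Int)) :=
  dataset.foldl (fun buckets item => buckets.modify item.2 [] (· ++ [item])) PySem.Dict.empty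

def get_specific_label_dataset_alt (class_label_list : List Int) (train_dataset : List (Int × Int)) (test_dataset : List (Int × Int)) : (List (Int × Int)) × (List (Int × Int)) :=
  let train_by_label := pvGroupByLabel train_dataset
  let test_by_label := pvGroupByLabel test_dataset
  (class_label_list.flatMap (fun label => train_by_label.getD label []),
   class_label_list.flatMap (fun label => test_by_label.getD label []))

-- ===== PRECONDITION & SPEC =====
def Spec_get_specific_label_dataset (class_label_list : List Int) (train_dataset : List (Int × Int)) (test_dataset : List (Int × Int)) (out : (List (Int × Int)) × (List (Int × Int))) : Prop := out = get_specific_label_dataset_alt class_label_list train_dataset test_dataset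
instance (class_label_list : List Int) (train_dataset : List (Int × Int)) (test_dataset : List (Int × Int)) (out : (List (Int × Int)) × (List (Int × Int))) : Decidable (Spec_get_specific_label_dataset class_label_list train_dataset test_dataset out) := by unfold Spec_get_specific_label_dataset; infer_instance

-- ===== CLAIM (what is proved, stated in full; the proofs are below) =====
def Claim_equal_get_specific_label_dataset : Prop := ∀ (class_label_list : List Int) (train_dataset : List (Int × Int)) (test_dataset : List (Int × Int)), Dom_get_specific_label_dataset class_label_list train_dataset test_dataset → Spec_get_specific_label_dataset class_label_list train_dataset test_dataset (get_specific_label_dataset class_label_list train_dataset test_dataset)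

-- ===== LEMMAS AND PROOFS =====

-- the bucket for label l is exactly A's one-label filter of the dataset
theorem pvGroup_getD (ds : List (Int × Int)) (d : PySem.Dict Int (List (Int × Int))) (l : Int) :
    (ds.foldl (fun buckets item => buckets.modify item.2 [] (· ++ [item])) d).getD l []
      = d.getD l [] ++ ds.filter (fun x => x.2 == l) := by
  induction ds generalizing d with
  | nil => simp
  | cons x xs ih =>
      simp only [List.foldl_cons, ih, List.filter_cons, PySem.Dict.getD_modify]
      by_cases h : x.2 = l
      · simp [h]
      · simp [h, Ne.symm h]

theorem one_label_eq_bucket (l : Int) (ds : List (Int × Int)) :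
    get_one_label_data l ds = (pvGroupByLabel ds).getD l [] := by
  simp [get_one_label_data, pvGroupByLabel, pvGroup_getD,
    PySem.List.foldl_append_ite_eq_filter]
  exact List.filter_congr (fun x _ => by by_cases h : x.2 = l <;> simp [h])

theorem foldl_pair_append (labels : List Int) (f g : Int → List (Int × Int))
    (a b : List (Int × Int)) :
    labels.foldl (fun acc l => (acc.1 ++ f l, acc.2 ++ g l)) (a, b)
      = (a ++ labels.flatMap f, b ++ labels.flatMap g) := by
  induction labels generalizing a b with
  | nil => simp
  | cons x xs ih => simp [ih]

-- ===== VERDICT (by name: the statement is the Claim_ definition above) =====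
theorem get_specific_label_dataset_spec : Claim_equal_get_specific_label_dataset := by
  intro labels train test _
  show _ = _
  simp only [get_specific_label_dataset, get_specific_label_dataset_alt,
    get_one_label_dataset, one_label_eq_bucket]
  exact foldl_pair_append labels _ _ [] []
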